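-- pv_equiv track=rewrite | github.com/sujupar/agente-mercado | agente-mercado/app/forex/instruments.py | _normalize_instrument
-- ===== SOURCE A (Python) =====
-- INSTRUMENT_CONFIG = {
--     "EUR_USD": {
--         "pip_size": 0.0001,
--         "pip_value_per_unit": 0.0001,  # 1 pip = $0.0001 por unidad
--         "max_spread_pips": 2.0,
--         "display": "EURUSD",
--         "min_units": 1,
--     },
--     "GBP_USD": {
--         "pip_size": 0.0001,
--         "pip_value_per_unit": 0.0001,
--         "max_spread_pips": 2.5,
--         "display": "GBPUSD",
--         "min_units": 1,
--     },
--     "USD_JPY": {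
--         "pip_size": 0.01,
--         "pip_value_per_unit": 0.01,  # Requiere conversión a USD
--         "max_spread_pips": 2.0,
--         "display": "USDJPY",
--         "min_units": 1,
--     },
--     "XAU_USD": {
--         "pip_size": 0.01,
--         "pip_value_per_unit": 0.01,  # 1 pip = $0.01 por unidad (1 oz)
--         "max_spread_pips": 30.0,  # Oro tiene spreads más amplios
--         "display": "XAUUSD",
--         "min_units": 1,
--     },
--     "BTC_USD": {
--         "pip_size": 1.0,
--         "pip_value_per_unit": 1.0,
--         "max_spread_pips": 50.0,
--         "display": "BTCUSD",
--         "min_units": 0.001,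
--     },
-- }
--
-- def _normalize_instrument(instrument: str) -> str:
--     """Normaliza 'EURUSD' o 'EUR_USD' al formato OANDA 'EUR_USD'."""
--     if "_" in instrument:
--         return instrument
--     # Intentar separar en posición 3 (la mayoría de pares forex)
--     for oanda_name, config in INSTRUMENT_CONFIG.items():
--         if config["display"] == instrument:
--             return oanda_name
--     # Fallback: insertar _ en posición 3
--     if len(instrument) == 6:
--         return f"{instrument[:3]}_{instrument[3:]}"
--     return instrument
-- ===== SOURCE B (Python) =====
-- def _normalize_instrument(instrument: str) -> str:
--     """Normaliza 'EURUSD' o 'EUR_USD' al formato OANDA 'EUR_USD'."""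
--     if "_" in instrument:
--         return instrument
--     if len(instrument) == 6:
--         return f"{instrument[:3]}_{instrument[3:]}"
--     return instrument
-- ===== Notes on version B (the rewrite author's own statement) =====
-- stated objective: simpler
-- what changed: Dropped the INSTRUMENT_CONFIG scan entirely: every config display equals its oanda_name with the position-3 underscore removed, so the generic len==6 underscore insertion already produces the same result and B computes it directly with no table or loop.
import Mathlib
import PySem

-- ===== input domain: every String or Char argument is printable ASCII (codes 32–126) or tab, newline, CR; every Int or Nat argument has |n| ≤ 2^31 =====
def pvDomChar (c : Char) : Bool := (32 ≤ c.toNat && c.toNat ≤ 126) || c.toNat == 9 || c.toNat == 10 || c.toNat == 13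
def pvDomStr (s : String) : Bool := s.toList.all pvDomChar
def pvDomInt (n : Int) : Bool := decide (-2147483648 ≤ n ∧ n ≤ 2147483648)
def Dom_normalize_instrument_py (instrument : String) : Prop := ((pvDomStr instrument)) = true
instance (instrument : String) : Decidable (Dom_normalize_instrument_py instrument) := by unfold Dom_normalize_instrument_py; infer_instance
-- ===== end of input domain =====

-- B drops the INSTRUMENT_CONFIG scan: every display equals its oanda_name minus the
-- position-3 underscore, so the generic len==6 insertion already gives the same answer (objective: simpler).

-- ===== PORT A =====
-- the (oanda_name, display) pairs of INSTRUMENT_CONFIG, in insertion order (only "display" is read)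
def pvConfigA : List (String × String) :=
  [("EUR_USD", "EURUSD"), ("GBP_USD", "GBPUSD"), ("USD_JPY", "USDJPY"),
   ("XAU_USD", "XAUUSD"), ("BTC_USD", "BTCUSD")]

-- the for-loop over INSTRUMENT_CONFIG.items(): first entry whose display equals instrument
def pvScanA : List (String × String) → String → Option String
  | [], _ => none
  | (name, disp) :: rest, instr => if disp = instr then some name else pvScanA rest instr

def normalize_instrument_py (instrument : String) : String :=
  if PySem.Str.isIn "_" instrument then instrument
  else
    match pvScanA pvConfigA instrument with
    | some name => name
    | none =>
      if PySem.Str.len instrument = 6 then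
        String.ofList ((PySem.Str.slice instrument none (some 3)).toList
          ++ '_' :: (PySem.Str.slice instrument (some 3) none).toList)
      else instrument

-- ===== PORT B =====
def normalize_instrument_py_alt (instrument : String) : String :=
  if PySem.Str.isIn "_" instrument then instrument
  else if PySem.Str.len instrument = 6 then
    String.ofList ((PySem.Str.slice instrument none (some 3)).toList
      ++ '_' :: (PySem.Str.slice instrument (some 3) none).toList)
  else instrument

-- ===== PRECONDITION & SPEC =====
def Spec_normalize_instrument_py (instrument : String) (out : String) : Prop := out = normalize_instrument_py_alt instrument
instance (instrument : String) (out : String) : Decidable (Spec_normalize_instrument_py instrument out) := by unfold Spec_normalize_instrument_py; infer_instance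

-- ===== CLAIM (what is proved, stated in full; the proofs are below) =====
def Claim_equal_normalize_instrument_py : Prop := ∀ (instrument : String), Dom_normalize_instrument_py instrument → Spec_normalize_instrument_py instrument (normalize_instrument_py instrument)

-- ===== LEMMAS AND PROOFS =====

-- If the scan finds no matching display, A's remaining code is literally B's code.
theorem pv_none_case (s : String) (h : pvScanA pvConfigA s = none)
    (hu : PySem.Str.isIn "_" s = false) :
    normalize_instrument_py s = normalize_instrument_py_alt s := by
  unfold normalize_instrument_py normalize_instrument_py_alt
  rw [hu, h]

theorem pv_equal (s : String) : normalize_instrument_py s = normalize_instrument_py_alt s := by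
  by_cases hu : PySem.Str.isIn "_" s = true
  · unfold normalize_instrument_py normalize_instrument_py_alt
    rw [hu]; simp
  · rw [Bool.not_eq_true] at hu
    -- case-split on the five config displays; each hit is checked by evaluation
    by_cases h1 : s = "EURUSD"; · subst h1; decide
    by_cases h2 : s = "GBPUSD"; · subst h2; decide
    by_cases h3 : s = "USDJPY"; · subst h3; decide
    by_cases h4 : s = "XAUUSD"; · subst h4; decide
    by_cases h5 : s = "BTCUSD"; · subst h5; decide
    have hscan : pvScanA pvConfigA s = none := by
      simp only [pvConfigA, pvScanA]
      rw [if_neg (fun h => h1 h.symm), if_neg (fun h => h2 h.symm),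
        if_neg (fun h => h3 h.symm), if_neg (fun h => h4 h.symm),
        if_neg (fun h => h5 h.symm)]
    exact pv_none_case s hscan hu

-- ===== VERDICT (by name: the statement is the Claim_ definition above) =====
theorem normalize_instrument_py_spec : Claim_equal_normalize_instrument_py := by
  intro s _
  unfold Spec_normalize_instrument_py
  exact pv_equal s
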